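-- pv_equiv track=rewrite | github.com/racai-ai/third_person | WebServiceModules/lib/saroj/conllu_utils.py | _get_ner_line_indexes_in_sentence
-- ===== SOURCE A (Python) =====
-- def _get_ner_line_indexes_in_sentence(
--                                       offset: tuple[int, int],
--                                       s_words: list[str]) -> tuple[int, int] | None:
--     """Given a start_offset, end_offset `offset` tuple, retrieves the range
--     of the index(es) of the line(s) in the CoNLL-U sentence which
--     should receive the NER annotation."""
--
--     tok_offset_start = 0
--     tok_offset_end = 0
--     left_i = -1
--     right_i = -1
--
--     for i, tok in enumerate(s_words):
--         tok_offset_end = tok_offset_start + len(tok)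
--
--         if not (tok_offset_end <= offset[0] or \
--                 offset[1] <= tok_offset_start):
--             if left_i == -1:
--                 left_i = i
--             # end if
--
--             right_i = i
--         elif offset[1] <= tok_offset_start:
--             break
--         # end if
--
--         tok_offset_start = tok_offset_end
--     # end for
--
--     if right_i == -1:
--         # s_words has the same length as th CoNLL-U sentence
--         right_i = len(s_words)
--     # end
--
--     if left_i >= 0 and left_i <= right_i:
--         # Lines found, right_i excluded, always
--         return (left_i, right_i + 1)
--     else:
--         return None
-- ===== SOURCE B (Python) =====
-- def _get_ner_line_indexes_in_sentence(
--                                       offset: tuple[int, int],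
--                                       s_words: list[str]) -> tuple[int, int] | None:
--     """Given a start_offset, end_offset `offset` tuple, retrieves the range
--     of the index(es) of the line(s) in the CoNLL-U sentence which
--     should receive the NER annotation."""
--
--     # Precompute the start offset of every token.
--     starts = []
--     pos = 0
--     for w in s_words:
--         starts.append(pos)
--         pos += len(w)
--
--     # Token i overlaps [offset[0], offset[1]) iff starts[i] + len(w_i) > offset[0]
--     # and starts[i] < offset[1]; since the offsets are nondecreasing the
--     # overlapping tokens are exactly the index range [left, right).
--     left = sum(1 for s, w in zip(starts, s_words) if s + len(w) <= offset[0])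
--     right = sum(1 for s in starts if s < offset[1])
--
--     if left < right:
--         return (left, right)
--
--     return None
-- ===== Notes on version B (the rewrite author's own statement) =====
-- stated objective: alternative
-- what changed: Replaces A's stateful first/last-match scan (sentinel indices, early break, post-loop fix-ups) with a precomputed offset table and two independent boundary counts over it; the overlap range is [left, right) by monotonicity of the offsets.
import Mathlib
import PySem

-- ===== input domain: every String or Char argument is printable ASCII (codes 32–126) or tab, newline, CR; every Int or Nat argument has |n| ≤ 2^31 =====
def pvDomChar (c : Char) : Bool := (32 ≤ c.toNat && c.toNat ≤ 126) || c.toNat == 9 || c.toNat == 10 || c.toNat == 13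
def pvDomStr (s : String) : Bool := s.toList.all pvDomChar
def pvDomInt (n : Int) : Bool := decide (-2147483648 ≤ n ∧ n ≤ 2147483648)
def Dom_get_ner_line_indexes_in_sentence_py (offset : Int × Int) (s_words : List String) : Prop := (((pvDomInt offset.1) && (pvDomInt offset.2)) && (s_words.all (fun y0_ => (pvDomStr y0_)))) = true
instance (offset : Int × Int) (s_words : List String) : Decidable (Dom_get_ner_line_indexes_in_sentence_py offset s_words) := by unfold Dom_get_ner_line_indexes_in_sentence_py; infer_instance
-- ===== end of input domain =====

-- B replaces A's stateful first/last-match scan (sentinels, break, post-loop fix-ups)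
-- with a precomputed offset table and two independent boundary counts (objective: alternative).


-- ===== PORT A =====
-- the for-loop of A: state (tok_offset_start, left_i, right_i, i); returns (left_i, right_i)
def aLoop (o0 o1 : Int) : List String → Int → Int → Int → Int → Int × Int
  | [], _, left_i, right_i, _ => (left_i, right_i)
  | tok :: rest, tokStart, left_i, right_i, i =>
    let tokEnd := tokStart + PySem.Str.len tok
    if ¬ (tokEnd ≤ o0 ∨ o1 ≤ tokStart) then
      aLoop o0 o1 rest tokEnd (if left_i = -1 then i else left_i) i (i + 1)
    else if o1 ≤ tokStart then
      (left_i, right_i)                       -- break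
    else
      aLoop o0 o1 rest tokEnd left_i right_i (i + 1)

def get_ner_line_indexes_in_sentence_py (offset : Int × Int) (s_words : List String) : Option (Int × Int) :=
  let lr := aLoop offset.1 offset.2 s_words 0 (-1) (-1) 0
  let left_i := lr.1
  let right_i := if lr.2 = -1 then (s_words.length : Int) else lr.2
  if 0 ≤ left_i ∧ left_i ≤ right_i then some (left_i, right_i + 1) else none

-- ===== PORT B =====
-- Source B's first loop: the list of token start offsets
def startsList : List String → Int → List Int
  | [], _ => []
  | w :: ws, pos => pos :: startsList ws (pos + PySem.Str.len w)

def get_ner_line_indexes_in_sentence_py_alt (offset : Int × Int) (s_words : List String) : Option (Int × Int) :=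
  let starts := startsList s_words 0
  -- the two 0/1-sums of Source B are counts
  let left : Int := ((starts.zip s_words).countP (fun p => decide (p.1 + PySem.Str.len p.2 ≤ offset.1)) : Int)
  let right : Int := ((starts.countP (fun s => decide (s < offset.2))) : Int)
  if left < right then some (left, right) else none

-- ===== PRECONDITION & SPEC =====
def Spec_get_ner_line_indexes_in_sentence_py (offset : Int × Int) (s_words : List String) (out : Option (Int × Int)) : Prop := out = get_ner_line_indexes_in_sentence_py_alt offset s_words
instance (offset : Int × Int) (s_words : List String) (out : Option (Int × Int)) : Decidable (Spec_get_ner_line_indexes_in_sentence_py offset s_words out) := by unfold Spec_get_ner_line_indexes_in_sentence_py; infer_instance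

-- ===== CLAIM (what is proved, stated in full; the proofs are below) =====
def Claim_equal_get_ner_line_indexes_in_sentence_py : Prop := ∀ (offset : Int × Int) (s_words : List String), Dom_get_ner_line_indexes_in_sentence_py offset s_words → Spec_get_ner_line_indexes_in_sentence_py offset s_words (get_ner_line_indexes_in_sentence_py offset s_words)

-- ===== LEMMAS AND PROOFS =====

-- reference counts: number of tokens whose end is ≤ o0 / whose start is < o1
def cntE (o0 : Int) : List String → Int → Int
  | [], _ => 0
  | w :: ws, st => (if st + PySem.Str.len w ≤ o0 then 1 else 0) + cntE o0 ws (st + PySem.Str.len w)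

def cntS (o1 : Int) : List String → Int → Int
  | [], _ => 0
  | w :: ws, st => (if st < o1 then 1 else 0) + cntS o1 ws (st + PySem.Str.len w)

theorem len_nonneg (w : String) : 0 ≤ PySem.Str.len w := by
  simp [PySem.Str.len_eq]

theorem cntE_nonneg (o0 : Int) (ws : List String) (st : Int) : 0 ≤ cntE o0 ws st := by
  induction ws generalizing st with
  | nil => simp [cntE]
  | cons w ws ih =>
    simp only [cntE]
    have := ih (st + PySem.Str.len w)
    split <;> omega

theorem cntS_nonneg (o1 : Int) (ws : List String) (st : Int) : 0 ≤ cntS o1 ws st := by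
  induction ws generalizing st with
  | nil => simp [cntS]
  | cons w ws ih =>
    simp only [cntS]
    have := ih (st + PySem.Str.len w)
    split <;> omega

theorem cntE_zero (o0 : Int) (ws : List String) (st : Int) (h : o0 < st) : cntE o0 ws st = 0 := by
  induction ws generalizing st with
  | nil => simp [cntE]
  | cons w ws ih =>
    have hl := len_nonneg w
    simp only [cntE]
    rw [if_neg (by omega), ih (st + PySem.Str.len w) (by omega)]
    omega

theorem cntS_zero (o1 : Int) (ws : List String) (st : Int) (h : o1 ≤ st) : cntS o1 ws st = 0 := by
  induction ws generalizing st with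
  | nil => simp [cntS]
  | cons w ws ih =>
    have hl := len_nonneg w
    simp only [cntS]
    rw [if_neg (by omega), ih (st + PySem.Str.len w) (by omega)]
    omega

-- A's loop once an overlapping token has been seen: left_i is frozen, right_i follows cntS
theorem aLoop_overlapped (o0 o1 : Int) (ws : List String) (st left_i i : Int)
    (hst : o0 < st) (hl : left_i ≠ -1) :
    aLoop o0 o1 ws st left_i (i - 1) i = (left_i, i + cntS o1 ws st - 1) := by
  induction ws generalizing st i with
  | nil => simp [aLoop, cntS]
  | cons w ws ih =>
    have hlen := len_nonneg w
    simp only [aLoop, cntS]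
    by_cases h2 : o1 ≤ st
    · rw [if_neg (by omega), if_pos h2, if_neg (by omega),
        cntS_zero o1 ws (st + PySem.Str.len w) (by omega)]
      congr 1
      omega
    · rw [if_pos (by omega), if_neg hl, if_pos (by omega)]
      have h := ih (st + PySem.Str.len w) (i + 1) (by omega)
      rw [show i + 1 - 1 = i from by omega] at h
      rw [h]
      congr 1
      omega

-- A's loop from the fresh state (-1, -1)
theorem aLoop_fresh (o0 o1 : Int) (ws : List String) (st i : Int) (hi : 0 ≤ i) :
    aLoop o0 o1 ws st (-1) (-1) i =
      if cntE o0 ws st < cntS o1 ws st then (i + cntE o0 ws st, i + cntS o1 ws st - 1)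
      else (-1, -1) := by
  induction ws generalizing st i with
  | nil => simp [aLoop, cntE, cntS]
  | cons w ws ih =>
    have hlen := len_nonneg w
    have hE' := cntE_nonneg o0 ws (st + PySem.Str.len w)
    have hS' := cntS_nonneg o1 ws (st + PySem.Str.len w)
    simp only [aLoop, cntE, cntS]
    have hE'0 := cntE_nonneg o0 ws (st + PySem.Str.len w)
    have hS'0 := cntS_nonneg o1 ws (st + PySem.Str.len w)
    set E' := cntE o0 ws (st + PySem.Str.len w) with hEe
    set S' := cntS o1 ws (st + PySem.Str.len w) with hSe
    by_cases h2 : o1 ≤ st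
    · -- the elif fires and the loop breaks with (-1, -1)
      have hS0 : S' = 0 := by rw [hSe]; exact cntS_zero o1 ws (st + PySem.Str.len w) (by omega)
      rw [if_neg (show ¬¬(st + PySem.Str.len w ≤ o0 ∨ o1 ≤ st) from by omega), if_pos h2,
        if_neg (show ¬((if st + PySem.Str.len w ≤ o0 then (1 : Int) else 0) + E' <
          (if st < o1 then (1 : Int) else 0) + S') from by omega)]
    · by_cases h1 : st + PySem.Str.len w ≤ o0
      · -- token entirely before the interval: plain next iteration
        rw [if_neg (show ¬¬(st + PySem.Str.len w ≤ o0 ∨ o1 ≤ st) from by omega), if_neg h2,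
          ih (st + PySem.Str.len w) (i + 1) (by omega), if_pos h1,
          if_pos (show st < o1 from by omega), ← hEe, ← hSe]
        by_cases h3 : E' < S'
        · rw [if_pos h3, if_pos (show (1 : Int) + E' < 1 + S' from by omega)]
          congr 1 <;> omega
        · rw [if_neg h3, if_neg (show ¬((1 : Int) + E' < 1 + S') from by omega)]
      · -- first overlapping token: left_i becomes i, then aLoop_overlapped
        have hE0 : E' = 0 := by rw [hEe]; exact cntE_zero o0 ws (st + PySem.Str.len w) (by omega)
        rw [if_pos (show ¬(st + PySem.Str.len w ≤ o0 ∨ o1 ≤ st) from by omega), if_pos (by trivial)]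
        have h := aLoop_overlapped o0 o1 ws (st + PySem.Str.len w) i (i + 1)
          (by omega) (by omega)
        rw [show i + 1 - 1 = i from by omega] at h
        rw [← hSe] at h
        rw [h, if_neg h1, if_pos (show st < o1 from by omega),
          if_pos (show (0 : Int) + E' < 1 + S' from by omega)]
        congr 1 <;> omega

-- B's counts coincide with the reference counts
theorem countE_eq (o0 : Int) (ws : List String) (st : Int) :
    (((startsList ws st).zip ws).countP (fun p => decide (p.1 + PySem.Str.len p.2 ≤ o0)) : Int)
      = cntE o0 ws st := by
  induction ws generalizing st with
  | nil => simp [startsList, cntE]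
  | cons w ws ih =>
    have h := ih (st + PySem.Str.len w)
    simp only [startsList, cntE, List.zip_cons_cons, List.countP_cons, decide_eq_true_eq,
      PySem.Str.len_eq] at h ⊢
    push_cast [apply_ite]
    omega

theorem countS_eq (o1 : Int) (ws : List String) (st : Int) :
    (((startsList ws st).countP (fun s => decide (s < o1))) : Int) = cntS o1 ws st := by
  induction ws generalizing st with
  | nil => simp [startsList, cntS]
  | cons w ws ih =>
    have h := ih (st + PySem.Str.len w)
    simp only [startsList, cntS, List.countP_cons, decide_eq_true_eq,
      PySem.Str.len_eq] at h ⊢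
    push_cast [apply_ite]
    omega

-- ===== VERDICT (by name: the statement is the Claim_ definition above) =====
theorem get_ner_line_indexes_in_sentence_py_spec : Claim_equal_get_ner_line_indexes_in_sentence_py := by
  intro offset s_words _
  unfold Spec_get_ner_line_indexes_in_sentence_py
  have hE0 := cntE_nonneg offset.1 s_words 0
  have hS0 := cntS_nonneg offset.2 s_words 0
  by_cases h : cntE offset.1 s_words 0 < cntS offset.2 s_words 0
  · simp only [get_ner_line_indexes_in_sentence_py, get_ner_line_indexes_in_sentence_py_alt,
      aLoop_fresh offset.1 offset.2 s_words 0 0 le_rfl, countE_eq, countS_eq,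
      if_pos h, zero_add]
    rw [if_neg (show ¬(cntS offset.2 s_words 0 - 1 = -1) from by omega),
      if_pos (show (0 : Int) ≤ cntE offset.1 s_words 0 ∧
        cntE offset.1 s_words 0 ≤ cntS offset.2 s_words 0 - 1 from ⟨by omega, by omega⟩)]
    congr 1
    congr 1
    omega
  · simp only [get_ner_line_indexes_in_sentence_py, get_ner_line_indexes_in_sentence_py_alt,
      aLoop_fresh offset.1 offset.2 s_words 0 0 le_rfl, countE_eq, countS_eq,
      if_neg h, if_true]
    rw [if_neg (show ¬((0 : Int) ≤ -1 ∧ (-1 : Int) ≤ (s_words.length : Int)) from by omega)]
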